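-- pv_equiv track=rewrite | github.com/mneron1/2025_RTIOC_OctoberCTF | artifacts/samples/DAY-10/decode_secret_v3.py | cheat_decode_final
-- ===== SOURCE A (Python) =====
-- def cheat_decode_final(encoded: str, key_char: str) -> str:
--     """
--     XOR every even index (0, 2, 4, ...) with ord(key_char).
--     This matches JS xorEncode() when pass="5".
--     """
--     key = ord(key_char)
--     chars = []
--     for i, ch in enumerate(encoded):
--         if i % 2 == 0:  # XOR even indices
--             chars.append(chr(ord(ch) ^ key))
--         else:
--             chars.append(ch)
--     return ''.join(chars)
-- ===== SOURCE B (Python) =====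
-- def cheat_decode_final(encoded: str, key_char: str) -> str:
--     # Consume the string two characters at a time: XOR the first of each
--     # pair with the key, pass the second through unchanged.
--     key = ord(key_char)
--     it = iter(encoded)
--     out = []
--     for x in it:
--         out.append(chr(ord(x) ^ key))
--         out.append(next(it, ''))
--     return ''.join(out)
-- ===== Notes on version B (the rewrite author's own statement) =====
-- stated objective: alternative
-- what changed: Instead of enumerating indices and testing i % 2 per character, B consumes the string two characters at a time from an iterator (XOR the first of each pair, keep the second), so index bookkeeping and the parity test disappear.
import Mathlib
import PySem

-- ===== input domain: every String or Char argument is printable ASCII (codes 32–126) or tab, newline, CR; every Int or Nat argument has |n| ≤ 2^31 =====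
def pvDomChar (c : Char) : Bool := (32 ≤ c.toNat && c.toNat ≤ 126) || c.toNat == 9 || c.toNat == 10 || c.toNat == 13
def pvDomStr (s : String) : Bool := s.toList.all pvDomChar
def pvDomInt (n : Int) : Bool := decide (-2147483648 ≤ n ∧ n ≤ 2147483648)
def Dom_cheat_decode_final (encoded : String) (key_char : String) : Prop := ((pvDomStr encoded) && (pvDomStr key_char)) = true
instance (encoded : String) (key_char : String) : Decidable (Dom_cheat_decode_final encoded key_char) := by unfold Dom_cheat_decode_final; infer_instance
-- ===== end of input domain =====

-- B consumes the string two characters at a time (XOR first of each pair, keep the second),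
-- replacing A's index-enumeration with its parity test; alternative decomposition, same cost.


-- ===== PORT A =====
-- ord(key_char) raises TypeError unless key_char has length 1 (Pre_ requires that);
-- chr(ord(ch) ^ key) is exact here: both operands are nonnegative code points.
def cheat_decode_final (encoded : String) (key_char : String) : String :=
  let key : Int := (((PySem.Str.pyGet? key_char 0).getD 'A').toNat : Int)  -- key = ord(key_char)
  let chars : List Char :=
    (PySem.List.enumerate encoded.toList 0).foldl
      (fun acc p =>
        if PySem.Int.mod p.1 2 == 0 then
          acc ++ [Char.ofNat (PySem.Int.bxor (p.2.toNat : Int) key).toNat]  -- chr(ord(ch) ^ key)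
        else
          acc ++ [p.2]) []
  String.ofList chars  -- ''.join(chars)

-- ===== PORT B =====
-- the 'for x in it' loop of Source B, which takes two characters per iteration
def pvAltGo (key : Int) : List Char → List Char
  | [] => []
  | [x] => [Char.ofNat (PySem.Int.bxor (x.toNat : Int) key).toNat]  -- next(it, '') appends nothing
  | x :: y :: rest =>
      Char.ofNat (PySem.Int.bxor (x.toNat : Int) key).toNat :: y :: pvAltGo key rest

def cheat_decode_final_alt (encoded : String) (key_char : String) : String :=
  let key : Int := (((PySem.Str.pyGet? key_char 0).getD 'A').toNat : Int)  -- key = ord(key_char)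
  String.ofList (pvAltGo key encoded.toList)  -- ''.join(out)

-- ===== PRECONDITION & SPEC =====
-- Pre_ excludes exactly the inputs where ord(key_char) raises TypeError (key not a single character).
def Pre_cheat_decode_final (encoded : String) (key_char : String) : Prop :=
  key_char.toList.length = 1
instance (encoded : String) (key_char : String) : Decidable (Pre_cheat_decode_final encoded key_char) := by
  unfold Pre_cheat_decode_final; infer_instance

def pvWitness_cheat_decode_final : String × String := ("abc", "5")

def Spec_cheat_decode_final (encoded : String) (key_char : String) (out : String) : Prop := out = cheat_decode_final_alt encoded key_char
instance (encoded : String) (key_char : String) (out : String) : Decidable (Spec_cheat_decode_final encoded key_char out) := by unfold Spec_cheat_decode_final; infer_instance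

-- ===== CLAIM (what is proved, stated in full; the proofs are below) =====
def Claim_equal_cheat_decode_final : Prop := ∀ (encoded : String) (key_char : String), Dom_cheat_decode_final encoded key_char → Pre_cheat_decode_final encoded key_char → Spec_cheat_decode_final encoded key_char (cheat_decode_final encoded key_char)

-- ===== LEMMAS AND PROOFS =====

-- two-characters-at-a-time induction principle matching pvAltGo's recursion
theorem pvTwoStep {P : List Char → Prop} (h0 : P []) (h1 : ∀ x, P [x])
    (h2 : ∀ x y rest, P rest → P (x :: y :: rest)) : ∀ xs, P xs
  | [] => h0
  | [x] => h1 x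
  | x :: y :: rest => h2 x y rest (pvTwoStep h0 h1 h2 rest)

theorem pvFoldA_eq_altGo (key : Int) :
    ∀ (xs : List Char) (s : Nat) (acc : List Char),
      (PySem.List.enumerate xs ((2 * s : Nat) : Int)).foldl
        (fun acc p =>
          if PySem.Int.mod p.1 2 == 0 then
            acc ++ [Char.ofNat (PySem.Int.bxor (p.2.toNat : Int) key).toNat]
          else
            acc ++ [p.2]) acc
      = acc ++ pvAltGo key xs := by
  intro xs
  induction xs using pvTwoStep with
  | h0 => intro s acc; simp [PySem.List.enumerate_nil, pvAltGo]
  | h1 x =>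
      intro s acc
      simp [PySem.List.enumerate_cons, PySem.List.enumerate_nil, pvAltGo, List.foldl]
  | h2 x y rest ih =>
      intro s acc
      have hcast : (((2 * s : Nat) : Int) + 1 + 1) = (((2 * (s + 1) : Nat) : Int)) := by
        push_cast; ring
      rw [PySem.List.enumerate_cons, PySem.List.enumerate_cons, hcast]
      simp only [List.foldl_cons]
      rw [ih (s + 1)]
      simp [pvAltGo]

-- ===== VERDICT (by name: the statement is the Claim_ definition above) =====
theorem cheat_decode_final_spec : Claim_equal_cheat_decode_final := by
  intro encoded key_char _ _
  unfold Spec_cheat_decode_final cheat_decode_final cheat_decode_final_alt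
  have h := pvFoldA_eq_altGo
    (((PySem.Str.pyGet? key_char 0).getD 'A').toNat : Int) encoded.toList 0 []
  simp only [Nat.mul_zero, Nat.cast_zero, List.nil_append] at h
  exact congrArg String.ofList h
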